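-- pv_equiv track=rewrite | github.com/Jyotirjay37/Transcript-Generator- | music.py | build_minutes_md
-- ===== SOURCE A (Python) =====
-- from typing import List, Dict
--
-- def build_minutes_md(title: str, summary: str, items: Dict[str, List[str]]) -> str:
--     md = [f"# {title}", "", "## Executive Summary", "", summary or "_(No summary)_", ""]
--     if items.get("decisions"):
--         md += ["## Key Decisions", ""] + [f"- {d}" for d in items["decisions"]] + [""]
--     if items.get("actions"):
--         md += ["## Action Items", ""] + [f"- {a}" for a in items["actions"]] + [""]
--     if items.get("risks"):
--         md += ["## Risks / Blockers", ""] + [f"- {r}" for r in items["risks"]] + [""]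
--     return "\n".join(md)
-- ===== SOURCE B (Python) =====
-- def build_minutes_md(title, summary, items):
--     def block(heading, vals):
--         return heading + "\n\n" + "\n".join("- " + x for x in vals) + "\n"
--
--     def render(specs):
--         if not specs:
--             return []
--         key, heading = specs[0]
--         vals = items.get(key)
--         rest = render(specs[1:])
--         return ([block(heading, vals)] + rest) if vals else rest
--
--     head = ("# " + title + "\n\n## Executive Summary\n\n"
--             + (summary or "_(No summary)_") + "\n")
--     return "\n".join([head] + render([("decisions", "## Key Decisions"),
--                                       ("actions", "## Action Items"),
--                                       ("risks", "## Risks / Blockers")]))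
-- ===== Notes on version B (the rewrite author's own statement) =====
-- stated objective: alternative
-- what changed: A accumulates one flat list of markdown LINES and joins once at the end; B recursively renders each section of a section table into a single pre-joined string block and joins the head string with the block list, relying on join(' ', xs++ys) = join(xs)+' '+join(ys).
import Mathlib
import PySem

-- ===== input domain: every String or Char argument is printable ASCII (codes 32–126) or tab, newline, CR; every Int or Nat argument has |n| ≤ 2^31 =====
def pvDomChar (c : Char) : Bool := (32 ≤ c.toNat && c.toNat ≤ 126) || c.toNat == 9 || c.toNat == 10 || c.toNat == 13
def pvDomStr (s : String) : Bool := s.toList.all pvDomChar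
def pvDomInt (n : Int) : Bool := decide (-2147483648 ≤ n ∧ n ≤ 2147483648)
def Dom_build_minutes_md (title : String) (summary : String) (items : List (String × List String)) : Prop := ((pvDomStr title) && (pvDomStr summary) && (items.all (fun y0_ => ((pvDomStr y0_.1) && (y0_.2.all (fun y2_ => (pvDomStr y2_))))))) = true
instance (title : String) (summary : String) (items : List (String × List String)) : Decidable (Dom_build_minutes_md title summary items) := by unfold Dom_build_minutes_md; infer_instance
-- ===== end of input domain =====

-- B builds each section as one pre-joined string block (recursively over a section table) and joins blocks, instead of A's flat line list; same output, different decomposition.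

-- ===== PORT A =====
-- A: fixed prelude LINE LIST, three sequential if-blocks each concatenating section lines, one final join.
def build_minutes_md (title : String) (summary : String) (items : List (String × List String)) : String :=
  let md := ["# " ++ title, "", "## Executive Summary", "",
             (if summary = "" then "_(No summary)_" else summary), ""]
  let md := match items.lookup "decisions" with
    | some vals => if vals ≠ [] then md ++ ((["## Key Decisions", ""] ++ vals.map (fun d => "- " ++ d)) ++ [""]) else md
    | none => md
  let md := match items.lookup "actions" with
    | some vals => if vals ≠ [] then md ++ ((["## Action Items", ""] ++ vals.map (fun a => "- " ++ a)) ++ [""]) else md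
    | none => md
  let md := match items.lookup "risks" with
    | some vals => if vals ≠ [] then md ++ ((["## Risks / Blockers", ""] ++ vals.map (fun r => "- " ++ r)) ++ [""]) else md
    | none => md
  PySem.Str.join "\n" md

-- ===== PORT B =====
-- B: each section becomes ONE pre-joined string block; blocks are collected by structural
-- recursion over the section table and joined with the head string at the end.
def bmBlock (heading : String) (vals : List String) : String :=
  heading ++ "\n\n" ++ PySem.Str.join "\n" (vals.map (fun x => "- " ++ x)) ++ "\n"

def bmRender (items : List (String × List String)) : List (String × String) → List String
  | [] => []
  | (key, heading) :: specs =>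
      let rest := bmRender items specs
      match items.lookup key with
      | some vals => if vals ≠ [] then bmBlock heading vals :: rest else rest
      | none => rest

def build_minutes_md_alt (title : String) (summary : String) (items : List (String × List String)) : String :=
  let head := "# " ++ title ++ "\n\n## Executive Summary\n\n"
              ++ (if summary = "" then "_(No summary)_" else summary) ++ "\n"
  PySem.Str.join "\n" ([head] ++ bmRender items
    [("decisions", "## Key Decisions"), ("actions", "## Action Items"), ("risks", "## Risks / Blockers")])

-- ===== PRECONDITION & SPEC =====
def Spec_build_minutes_md (title : String) (summary : String) (items : List (String × List String)) (out : String) : Prop := out = build_minutes_md_alt title summary items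
instance (title : String) (summary : String) (items : List (String × List String)) (out : String) : Decidable (Spec_build_minutes_md title summary items out) := by unfold Spec_build_minutes_md; infer_instance

-- ===== CLAIM (what is proved, stated in full; the proofs are below) =====
def Claim_equal_build_minutes_md : Prop := ∀ (title : String) (summary : String) (items : List (String × List String)), Dom_build_minutes_md title summary items → Spec_build_minutes_md title summary items (build_minutes_md title summary items)

-- ===== LEMMAS AND PROOFS =====
theorem join_cc (sep p q : String) (rest : List String) : PySem.Str.join sep (p::q::rest) = p ++ sep ++ PySem.Str.join sep (q::rest) := by
  simp [PySem.Str.join, PySem.Chars.join_cons_cons, String.append_assoc]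

theorem join_one (sep s : String) : PySem.Str.join sep [s] = s := by
  simp [PySem.Str.join, PySem.Chars.join, List.intercalate]

theorem join_append (a b : List String) (ha : a ≠ []) (hb : b ≠ []) :
    PySem.Str.join "\n" (a ++ b) = PySem.Str.join "\n" a ++ "\n" ++ PySem.Str.join "\n" b := by
  induction a with
  | nil => exact absurd rfl ha
  | cons x a ih =>
    cases a with
    | nil =>
      cases b with
      | nil => exact absurd rfl hb
      | cons y bs => simp [join_cc, join_one]
    | cons z zs =>
      have h := ih (by simp)
      rw [List.cons_append] at h
      cases b with
      | nil => exact absurd rfl hb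
      | cons y bs =>
        rw [List.cons_append, List.cons_append, join_cc, join_cc, h]; simp [String.append_assoc]

theorem head_eq (t s : String) :
    PySem.Str.join "\n" ["# " ++ t, "", "## Executive Summary", "", s, ""] =
      "# " ++ t ++ "\n\n## Executive Summary\n\n" ++ s ++ "\n" := by
  rw [join_cc, join_cc, join_cc, join_cc, join_cc, join_one, ← String.toList_inj]
  simp

theorem block_eq (h : String) (vals : List String) (hv : vals ≠ []) :
    PySem.Str.join "\n" (([h, ""] ++ vals.map (fun x => "- " ++ x)) ++ [""]) =
      bmBlock h vals := by
  cases vals with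
  | nil => exact absurd rfl hv
  | cons v vs =>
    rw [bmBlock, List.map_cons]
    rw [show ([h, ""] ++ (("- " ++ v) :: vs.map (fun x => "- " ++ x))) ++ [""] =
        h :: "" :: ((("- " ++ v) :: vs.map (fun x => "- " ++ x)) ++ [""]) by simp]
    simp only [List.cons_append]
    rw [join_cc, join_cc,
        show ("- " ++ v) :: (vs.map (fun x => "- " ++ x) ++ [""]) =
          (("- " ++ v) :: vs.map (fun x => "- " ++ x)) ++ [""] from by simp,
        join_append _ [""] (by simp) (by simp), join_one, ← String.toList_inj]
    simp

theorem sec_eq (X : List String) (hX : X ≠ []) (h : String) (vals : List String) (hv : vals ≠ []) :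
    PySem.Str.join "\n" (X ++ (([h, ""] ++ vals.map (fun x => "- " ++ x)) ++ [""])) =
      PySem.Str.join "\n" X ++ "\n" ++ bmBlock h vals := by
  rw [join_append X _ hX (by simp), block_eq _ _ hv]

-- ===== VERDICT (by name: the statement is the Claim_ definition above) =====
theorem build_minutes_md_spec : Claim_equal_build_minutes_md := by
  intro title summary items _
  show build_minutes_md title summary items = build_minutes_md_alt title summary items
  simp only [build_minutes_md, build_minutes_md_alt, bmRender]
  cases hd : items.lookup "decisions" with
  | none =>
    cases ha : items.lookup "actions" with
    | none =>
      cases hr : items.lookup "risks" with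
      | none => simp only [List.append_nil]; rw [head_eq, join_one]
      | some vr =>
        by_cases hvr : vr = []
        · (simp only [List.singleton_append, List.append_nil, ne_eq, hvr, not_false_eq_true, not_true_eq_false, ite_true, ite_false]; rw [head_eq]; rw [join_one])
        · (simp only [List.singleton_append, List.append_nil, ne_eq, hvr, not_false_eq_true, not_true_eq_false, ite_true, ite_false]; rw [sec_eq _ (by simp) _ _ hvr]; rw [head_eq]; rw [join_cc, join_one]; all_goals (rw [← String.toList_inj]; simp))
    | some va =>
      by_cases hva : va = []
      all_goals cases hr : items.lookup "risks" with
      | none =>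
        first
        | (simp only [List.singleton_append, List.append_nil, ne_eq, hva, not_false_eq_true, not_true_eq_false, ite_true, ite_false]; rw [head_eq]; rw [join_one])
        | (simp only [List.singleton_append, List.append_nil, ne_eq, hva, not_false_eq_true, not_true_eq_false, ite_true, ite_false]; rw [sec_eq _ (by simp) _ _ hva]; rw [head_eq]; rw [join_cc, join_one]; all_goals (rw [← String.toList_inj]; simp))
      | some vr =>
        by_cases hvr : vr = []
        · first
          | (simp only [List.singleton_append, List.append_nil, ne_eq, hva, hvr, not_false_eq_true, not_true_eq_false, ite_true, ite_false]; rw [head_eq]; rw [join_one])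
          | (simp only [List.singleton_append, List.append_nil, ne_eq, hvr, hva, not_false_eq_true, not_true_eq_false, ite_true, ite_false]; rw [sec_eq _ (by simp) _ _ hva]; rw [head_eq]; rw [join_cc, join_one]; all_goals (rw [← String.toList_inj]; simp))
        · first
          | (simp only [List.singleton_append, List.append_nil, ne_eq, hva, hvr, not_false_eq_true, not_true_eq_false, ite_true, ite_false]; rw [sec_eq _ (by simp) _ _ hvr]; rw [head_eq]; rw [join_cc, join_one]; all_goals (rw [← String.toList_inj]; simp))
          | (simp only [List.singleton_append, List.append_nil, ne_eq, hva, hvr, not_false_eq_true, not_true_eq_false, ite_true, ite_false]; rw [sec_eq _ (by simp) _ _ hvr]; rw [sec_eq _ (by simp) _ _ hva]; rw [head_eq]; rw [join_cc, join_cc, join_one]; all_goals (rw [← String.toList_inj]; simp))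
  | some vd =>
    by_cases hvd : vd = []
    all_goals cases ha : items.lookup "actions" with
    | none =>
      cases hr : items.lookup "risks" with
      | none =>
        first
        | (simp only [List.singleton_append, List.append_nil, ne_eq, hvd, not_false_eq_true, not_true_eq_false, ite_true, ite_false]; rw [head_eq]; rw [join_one])
        | (simp only [List.singleton_append, List.append_nil, ne_eq, hvd, not_false_eq_true, not_true_eq_false, ite_true, ite_false]; rw [sec_eq _ (by simp) _ _ hvd]; rw [head_eq]; rw [join_cc, join_one]; all_goals (rw [← String.toList_inj]; simp))
      | some vr =>
        by_cases hvr : vr = []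
        · first
          | (simp only [List.singleton_append, List.append_nil, ne_eq, hvd, hvr, not_false_eq_true, not_true_eq_false, ite_true, ite_false]; rw [head_eq]; rw [join_one])
          | (simp only [List.singleton_append, List.append_nil, ne_eq, hvr, hvd, not_false_eq_true, not_true_eq_false, ite_true, ite_false]; rw [sec_eq _ (by simp) _ _ hvd]; rw [head_eq]; rw [join_cc, join_one]; all_goals (rw [← String.toList_inj]; simp))
        · first
          | (simp only [List.singleton_append, List.append_nil, ne_eq, hvd, hvr, not_false_eq_true, not_true_eq_false, ite_true, ite_false]; rw [sec_eq _ (by simp) _ _ hvr]; rw [head_eq]; rw [join_cc, join_one]; all_goals (rw [← String.toList_inj]; simp))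
          | (simp only [List.singleton_append, List.append_nil, ne_eq, hvd, hvr, not_false_eq_true, not_true_eq_false, ite_true, ite_false]; rw [sec_eq _ (by simp) _ _ hvr]; rw [sec_eq _ (by simp) _ _ hvd]; rw [head_eq]; rw [join_cc, join_cc, join_one]; all_goals (rw [← String.toList_inj]; simp))
    | some va =>
      by_cases hva : va = []
      all_goals cases hr : items.lookup "risks" with
      | none =>
        first
        | (simp only [List.singleton_append, List.append_nil, ne_eq, hvd, hva, not_false_eq_true, not_true_eq_false, ite_true, ite_false]; rw [head_eq]; rw [join_one])
        | (simp only [List.singleton_append, List.append_nil, ne_eq, hva, hvd, not_false_eq_true, not_true_eq_false, ite_true, ite_false]; rw [sec_eq _ (by simp) _ _ hvd]; rw [head_eq]; rw [join_cc, join_one]; all_goals (rw [← String.toList_inj]; simp))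
        | (simp only [List.singleton_append, List.append_nil, ne_eq, hvd, hva, not_false_eq_true, not_true_eq_false, ite_true, ite_false]; rw [sec_eq _ (by simp) _ _ hva]; rw [head_eq]; rw [join_cc, join_one]; all_goals (rw [← String.toList_inj]; simp))
        | (simp only [List.singleton_append, List.append_nil, ne_eq, hvd, hva, not_false_eq_true, not_true_eq_false, ite_true, ite_false]; rw [sec_eq _ (by simp) _ _ hva]; rw [sec_eq _ (by simp) _ _ hvd]; rw [head_eq]; rw [join_cc, join_cc, join_one]; all_goals (rw [← String.toList_inj]; simp))
      | some vr =>
        by_cases hvr : vr = []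
        · first
          | (simp only [List.singleton_append, List.append_nil, ne_eq, hvd, hva, hvr, not_false_eq_true, not_true_eq_false, ite_true, ite_false]; rw [head_eq]; rw [join_one])
          | (simp only [List.singleton_append, List.append_nil, ne_eq, hva, hvr, hvd, not_false_eq_true, not_true_eq_false, ite_true, ite_false]; rw [sec_eq _ (by simp) _ _ hvd]; rw [head_eq]; rw [join_cc, join_one]; all_goals (rw [← String.toList_inj]; simp))
          | (simp only [List.singleton_append, List.append_nil, ne_eq, hvd, hvr, hva, not_false_eq_true, not_true_eq_false, ite_true, ite_false]; rw [sec_eq _ (by simp) _ _ hva]; rw [head_eq]; rw [join_cc, join_one]; all_goals (rw [← String.toList_inj]; simp))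
          | (simp only [List.singleton_append, List.append_nil, ne_eq, hvr, hvd, hva, not_false_eq_true, not_true_eq_false, ite_true, ite_false]; rw [sec_eq _ (by simp) _ _ hva]; rw [sec_eq _ (by simp) _ _ hvd]; rw [head_eq]; rw [join_cc, join_cc, join_one]; all_goals (rw [← String.toList_inj]; simp))
        · first
          | (simp only [List.singleton_append, List.append_nil, ne_eq, hvd, hva, hvr, not_false_eq_true, not_true_eq_false, ite_true, ite_false]; rw [sec_eq _ (by simp) _ _ hvr]; rw [head_eq]; rw [join_cc, join_one]; all_goals (rw [← String.toList_inj]; simp))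
          | (simp only [List.singleton_append, List.append_nil, ne_eq, hva, hvd, hvr, not_false_eq_true, not_true_eq_false, ite_true, ite_false]; rw [sec_eq _ (by simp) _ _ hvr]; rw [sec_eq _ (by simp) _ _ hvd]; rw [head_eq]; rw [join_cc, join_cc, join_one]; all_goals (rw [← String.toList_inj]; simp))
          | (simp only [List.singleton_append, List.append_nil, ne_eq, hvd, hva, hvr, not_false_eq_true, not_true_eq_false, ite_true, ite_false]; rw [sec_eq _ (by simp) _ _ hvr]; rw [sec_eq _ (by simp) _ _ hva]; rw [head_eq]; rw [join_cc, join_cc, join_one]; all_goals (rw [← String.toList_inj]; simp))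
          | (simp only [List.singleton_append, List.append_nil, ne_eq, hvd, hva, hvr, not_false_eq_true, not_true_eq_false, ite_true, ite_false]; rw [sec_eq _ (by simp) _ _ hvr]; rw [sec_eq _ (by simp) _ _ hva]; rw [sec_eq _ (by simp) _ _ hvd]; rw [head_eq]; rw [join_cc, join_cc, join_cc, join_one]; all_goals (rw [← String.toList_inj]; simp))
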